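-- pv_equiv track=rewrite | github.com/cz-fish/advent-of-code | 2017/09.py | skip_garbage
-- ===== SOURCE A (Python) =====
-- def skip_garbage(soup, pos):
--     escape = False
--     removed = 0
--     while True:
--         assert pos < len(soup)
--         c = soup[pos]
--         pos += 1
--         if escape:
--             escape = False
--             continue
--         if c == '!':
--             escape = True
--         elif c == '>':
--             break
--         else:
--             removed += 1
--     return pos, removed
-- ===== SOURCE B (Python) =====
-- def skip_garbage(soup, pos):
--     # Derive the removed count arithmetically: removed = consumed span length
--     # minus two chars per escape pair minus the closing '>'.
--     start = pos
--     escapes = 0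
--     while True:
--         assert pos < len(soup)
--         c = soup[pos]
--         pos += 1
--         if c == '>':
--             return pos, (pos - start) - 2 * escapes - 1
--         if c == '!':
--             escapes += 1
--             assert pos < len(soup)
--             pos += 1
-- ===== Notes on version B (the rewrite author's own statement) =====
-- stated objective: alternative
-- what changed: B keeps no per-character removed counter and no escape flag: it remembers the start position, counts escape pairs (consuming each escaped character eagerly in the same iteration), and on the closing '>' computes removed arithmetically as consumed-length minus 2*escape-pairs minus 1.
import Mathlib
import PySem

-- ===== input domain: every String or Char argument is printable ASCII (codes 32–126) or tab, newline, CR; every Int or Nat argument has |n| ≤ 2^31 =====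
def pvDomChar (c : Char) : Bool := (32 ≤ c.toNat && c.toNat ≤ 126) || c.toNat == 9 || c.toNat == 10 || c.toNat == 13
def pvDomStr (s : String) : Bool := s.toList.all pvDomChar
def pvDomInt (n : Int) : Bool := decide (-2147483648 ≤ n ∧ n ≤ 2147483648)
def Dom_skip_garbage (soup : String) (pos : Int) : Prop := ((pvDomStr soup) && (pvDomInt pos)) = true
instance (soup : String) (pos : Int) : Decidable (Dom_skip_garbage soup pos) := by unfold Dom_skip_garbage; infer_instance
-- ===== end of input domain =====

-- B replaces A's per-character removed counter and escape flag by different bookkeeping: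
-- it counts escape pairs (consuming the escaped character eagerly) and derives removed
-- arithmetically from the consumed span length on the closing '>'. Return value only;
-- neither program mutates its arguments.

-- ===== PORT A =====
-- loop of A: state = (pos, escape, removed); (0, 0) stands for the branches where
-- Python raises (AssertionError when pos ≥ len, IndexError when soup[pos] is out of
-- range for a very negative pos) — both are excluded by Pre_skip_garbage.
def pvLoopA (l : List Char) (pos : Int) (escape : Bool) (removed : Int) : Int × Int :=
  if _h : pos < (l.length : Int) then
    match PySem.List.pyGet? l pos with
    | none => (0, 0)
    | some c =>
      if escape then pvLoopA l (pos + 1) false removed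
      else if c = '!' then pvLoopA l (pos + 1) true removed
      else if c = '>' then (pos + 1, removed)
      else pvLoopA l (pos + 1) escape (removed + 1)
  else (0, 0)
termination_by ((l.length : Int) - pos).toNat
decreasing_by all_goals omega

def skip_garbage (soup : String) (pos : Int) : Int × Int :=
  pvLoopA soup.toList pos false 0

-- ===== PORT B =====
-- loop of B: state = (pos, escapes); start is the remembered initial position; the
-- removed count is computed arithmetically only at the closing '>'.
def pvLoopB (l : List Char) (start : Int) (pos : Int) (escapes : Int) : Int × Int :=
  if _h : pos < (l.length : Int) then
    match PySem.List.pyGet? l pos with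
    | none => (0, 0)
    | some c =>
      if c = '>' then (pos + 1, (pos + 1 - start) - 2 * escapes - 1)
      else if c = '!' then
        if _h2 : pos + 1 < (l.length : Int) then pvLoopB l start (pos + 2) (escapes + 1)
        else (0, 0)
      else pvLoopB l start (pos + 1) escapes
  else (0, 0)
termination_by ((l.length : Int) - pos).toNat
decreasing_by all_goals omega

def skip_garbage_alt (soup : String) (pos : Int) : Int × Int :=
  pvLoopB soup.toList pos pos 0

-- ===== PRECONDITION & SPEC =====
-- Pre_ = exactly the inputs on which Python A RETURNS (elsewhere A raises
-- AssertionError or IndexError): the scan starting at pos — reading the suffix from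
-- pos, or, for a negative in-range pos, the suffix from len+pos followed by the whole
-- string (Python's negative-index wraparound) — reaches an unescaped '>'.
def pvClosed : List Char → Bool
  | [] => false
  | c :: rest =>
    if c = '>' then true
    else if c = '!' then
      match rest with
      | [] => false
      | _ :: r => pvClosed r
    else pvClosed rest

def Pre_skip_garbage (soup : String) (pos : Int) : Prop :=
  (if 0 ≤ pos then pvClosed (soup.toList.drop pos.toNat)
   else if -(soup.toList.length : Int) ≤ pos then
     pvClosed (soup.toList.drop ((soup.toList.length : Int) + pos).toNat ++ soup.toList)
   else false) = true

instance (soup : String) (pos : Int) : Decidable (Pre_skip_garbage soup pos) := by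
  unfold Pre_skip_garbage; infer_instance

def pvWitness_skip_garbage : String × Int := ("<a!>b>", 1)

def Spec_skip_garbage (soup : String) (pos : Int) (out : Int × Int) : Prop := out = skip_garbage_alt soup pos
instance (soup : String) (pos : Int) (out : Int × Int) : Decidable (Spec_skip_garbage soup pos out) := by unfold Spec_skip_garbage; infer_instance

-- ===== CLAIM (what is proved, stated in full; the proofs are below) =====
def Claim_equal_skip_garbage : Prop := ∀ (soup : String) (pos : Int), Dom_skip_garbage soup pos → Pre_skip_garbage soup pos → Spec_skip_garbage soup pos (skip_garbage soup pos)

-- ===== LEMMAS AND PROOFS =====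

-- a successful read means the index is in Python's range
lemma pvGet_some_inrange {l : List Char} {i : Int} {c : Char}
    (h : PySem.List.pyGet? l i = some c) : -(l.length : Int) ≤ i ∧ i < (l.length : Int) := by
  by_contra hn
  have : PySem.List.pyGet? l i = none := by
    rw [PySem.List.pyGet?_eq_none_iff]
    simpa [PySem.Raise.InRange] using hn
  simp [this] at h

-- one unfolding step of A's loop with the escape flag up
lemma pvLoopA_escape_step (l : List Char) (pos removed : Int)
    (h : pos < (l.length : Int)) {c : Char} (hg : PySem.List.pyGet? l pos = some c) :
    pvLoopA l pos true removed = pvLoopA l (pos + 1) false removed := by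
  rw [pvLoopA]; simp [h, hg]

lemma pvLoopA_escape_stop (l : List Char) (pos removed : Int)
    (h : ¬ pos < (l.length : Int)) : pvLoopA l pos true removed = (0, 0) := by
  rw [pvLoopA]; simp [h]

-- invariant linking the two loops: A's removed counter equals the span consumed so far
-- minus two characters per escape pair
lemma pvLoop_eq (l : List Char) (start : Int) :
    ∀ (n : Nat) (pos escapes : Int), ((l.length : Int) - pos).toNat ≤ n →
      pvLoopA l pos false ((pos - start) - 2 * escapes) = pvLoopB l start pos escapes := by
  intro n
  induction n with
  | zero =>
    intro pos escapes hn
    have hge : ¬ pos < (l.length : Int) := by omega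
    rw [pvLoopA, pvLoopB]
    simp [hge]
  | succ n ih =>
    intro pos escapes hn
    by_cases hlt : pos < (l.length : Int)
    · rw [pvLoopA, pvLoopB]
      simp only [hlt, dif_pos]
      cases hg : PySem.List.pyGet? l pos with
      | none => rfl
      | some c =>
        dsimp only
        have hin := pvGet_some_inrange hg
        by_cases hgt : c = '>'
        · have : pos - start - 2 * escapes = pos + 1 - start - 2 * escapes - 1 := by ring
          simp [hgt, this]
        · by_cases hbang : c = '!'
          · subst hbang
            rw [if_pos rfl, if_neg (by decide : ¬ ('!' = '>')), if_pos rfl]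
            by_cases h2 : pos + 1 < (l.length : Int)
            · -- A reads the escaped character (it is in range) and continues
              have hsome : ∃ c2, PySem.List.pyGet? l (pos + 1) = some c2 := by
                cases hg2 : PySem.List.pyGet? l (pos + 1) with
                | none =>
                  rw [PySem.List.pyGet?_eq_none_iff] at hg2
                  exact absurd ⟨by omega, h2⟩ hg2
                | some c2 => exact ⟨c2, rfl⟩
              obtain ⟨c2, hg2⟩ := hsome
              rw [pvLoopA_escape_step l (pos + 1) _ h2 hg2, dif_pos h2]
              have harith : pos - start - 2 * escapes
                  = (pos + 2 - start) - 2 * (escapes + 1) := by ring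
              rw [harith, show pos + 1 + 1 = pos + 2 by ring]
              exact ih (pos + 2) (escapes + 1) (by omega)
            · -- trailing '!': A raises at the assert of the next iteration, B at its inner assert
              rw [pvLoopA_escape_stop l (pos + 1) _ h2, dif_neg h2]
              simp
          · rw [if_neg hbang, if_neg hgt, if_neg hgt, if_neg hbang]
            have harith : pos - start - 2 * escapes + 1
                = (pos + 1 - start) - 2 * escapes := by ring
            rw [harith]
            exact ih (pos + 1) escapes (by omega)
    · rw [pvLoopA, pvLoopB]; simp [hlt]

-- ===== VERDICT (by name: the statement is the Claim_ definition above) =====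
theorem skip_garbage_spec : Claim_equal_skip_garbage := by
  intro soup pos _ _
  unfold Spec_skip_garbage skip_garbage skip_garbage_alt
  have h := pvLoop_eq soup.toList pos (((soup.toList.length : Int) - pos).toNat) pos 0 le_rfl
  simpa using h
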